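-- pv_equiv track=rewrite | github.com/JerryDu330/UWCompass | node_dfs.py | find_duplicate_or_nodes
-- ===== SOURCE A (Python) =====
-- def find_duplicate_or_nodes(graph):
--
--     seen = {}
--     duplicates = []
--
--     for node, deps in graph.items():
--
--         if not node.startswith("OR_NODE"):
--             continue
--
--         key = tuple(sorted(deps))
--
--         if key in seen:
--             duplicates.append((node, seen[key]))
--         else:
--             seen[key] = node
--
--     return duplicates
-- ===== SOURCE B (Python) =====
-- def find_duplicate_or_nodes(graph):
--     # pass 1: earliest OR_NODE per canonical (sorted) dependency set
--     first_by_key = {}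
--     for node, deps in graph.items():
--         if node.startswith("OR_NODE"):
--             key = tuple(sorted(deps))
--             if key not in first_by_key:
--                 first_by_key[key] = node
--     # pass 2: every later OR_NODE with an already-claimed key is a duplicate
--     duplicates = []
--     for node, deps in graph.items():
--         if node.startswith("OR_NODE"):
--             first = first_by_key[tuple(sorted(deps))]
--             if first != node:
--                 duplicates.append((node, first))
--     return duplicates
-- ===== Notes on version B (the rewrite author's own statement) =====
-- stated objective: alternative
-- what changed: A detects duplicates in a single pass that interleaves dict building with emission; B first builds an index of the earliest OR_NODE per sorted dependency set, then rescans the graph and emits (node, first) whenever the indexed first node differs from the current node.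
import Mathlib
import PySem

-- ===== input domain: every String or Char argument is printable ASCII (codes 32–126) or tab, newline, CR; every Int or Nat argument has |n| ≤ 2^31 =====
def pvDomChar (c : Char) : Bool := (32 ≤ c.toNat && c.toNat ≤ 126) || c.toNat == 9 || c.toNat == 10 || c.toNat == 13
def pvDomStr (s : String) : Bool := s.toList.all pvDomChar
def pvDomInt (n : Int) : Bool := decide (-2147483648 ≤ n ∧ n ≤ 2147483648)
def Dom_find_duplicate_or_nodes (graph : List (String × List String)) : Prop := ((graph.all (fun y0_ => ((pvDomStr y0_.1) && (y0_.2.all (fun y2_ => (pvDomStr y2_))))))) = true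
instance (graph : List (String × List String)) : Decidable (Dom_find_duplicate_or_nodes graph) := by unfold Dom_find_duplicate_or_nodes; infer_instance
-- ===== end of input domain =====

-- B replaces A's interleaved build-and-emit pass by an index pass (earliest OR_NODE per
-- sorted dependency set) followed by a rescan pass; a different decomposition, not faster.


-- ===== PORT A =====
-- key = tuple(sorted(deps))
def pvKey (deps : List String) : List String := PySem.List.sorted deps (fun x => x) false

-- A's single loop over graph.items() with state (seen, duplicates)
def pvALoop (items : List (String × List String)) (seen : PySem.Dict (List String) String)
    (dups : List (String × String)) : List (String × String) :=
  match items with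
  | [] => dups
  | (node, deps) :: rest =>
    if PySem.Str.startswith node "OR_NODE" = false then pvALoop rest seen dups
    else
      match seen.get? (pvKey deps) with
      | some first => pvALoop rest seen (dups ++ [(node, first)])
      | none => pvALoop rest (seen.insert (pvKey deps) node) dups

-- graph is a Python dict: iterate its items (duplicate keys in the list collapse as in dict())
def find_duplicate_or_nodes (graph : List (String × List String)) : List (String × String) :=
  pvALoop (PySem.Dict.ofList graph).items PySem.Dict.empty []

-- ===== PORT B =====
-- pass 1 step: record the earliest OR_NODE for each key, never overwriting
def pvBStep1 (d : PySem.Dict (List String) String) :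
    String × List String → PySem.Dict (List String) String :=
  fun (node, deps) =>
    if PySem.Str.startswith node "OR_NODE" && !(d.contains (pvKey deps)) then
      d.insert (pvKey deps) node
    else d

-- pass 2 body: what one item appends to the result
def pvBEmit (fbk : PySem.Dict (List String) String) :
    String × List String → List (String × String) :=
  fun (node, deps) =>
    if PySem.Str.startswith node "OR_NODE" then
      match fbk.get? (pvKey deps) with
      | some first => if first ≠ node then [(node, first)] else []
      | none => []   -- unreachable: pass 1 inserted every key pass 2 looks up
    else []

def find_duplicate_or_nodes_alt (graph : List (String × List String)) : List (String × String) :=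
  let items := (PySem.Dict.ofList graph).items
  let fbk := items.foldl pvBStep1 PySem.Dict.empty
  items.foldl (fun acc p => acc ++ pvBEmit fbk p) []

-- ===== PRECONDITION & SPEC =====
def Spec_find_duplicate_or_nodes (graph : List (String × List String)) (out : List (String × String)) : Prop := out = find_duplicate_or_nodes_alt graph
instance (graph : List (String × List String)) (out : List (String × String)) : Decidable (Spec_find_duplicate_or_nodes graph out) := by unfold Spec_find_duplicate_or_nodes; infer_instance

-- ===== CLAIM (what is proved, stated in full; the proofs are below) =====
def Claim_equal_find_duplicate_or_nodes : Prop := ∀ (graph : List (String × List String)), Dom_find_duplicate_or_nodes graph → Spec_find_duplicate_or_nodes graph (find_duplicate_or_nodes graph)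

-- ===== LEMMAS AND PROOFS =====

-- pass 1 never overwrites: a key already bound stays bound to the same node
theorem pvPass1_preserve (l : List (String × List String))
    (d : PySem.Dict (List String) String) (k : List String) (f : String)
    (h : d.get? k = some f) : (l.foldl pvBStep1 d).get? k = some f := by
  induction l generalizing d with
  | nil => simpa using h
  | cons p rest ih =>
    obtain ⟨n, dp⟩ := p
    simp only [List.foldl_cons]
    apply ih
    simp only [pvBStep1]
    split
    · next hc =>
      have hk : k ≠ pvKey dp := by
        intro he
        have : d.contains (pvKey dp) = true := by
          rw [PySem.Dict.contains_eq_isSome_get?, ← he, h]; rfl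
        simp [this] at hc
      rw [PySem.Dict.get?_insert_of_ne d n hk]
      exact h
    · exact h

-- the main invariant: A's loop from state (seen, dups) equals dups ++ what B's two
-- passes produce on the remaining items, continuing pass 1 from seen —
-- provided remaining node names are distinct and differ from every value seen holds
theorem pvMain (l : List (String × List String))
    (seen : PySem.Dict (List String) String) (dups : List (String × String))
    (hn : (l.map Prod.fst).Nodup)
    (h1 : ∀ p ∈ l, PySem.Str.startswith p.1 "OR_NODE" = true →
      ∀ f, seen.get? (pvKey p.2) = some f → f ≠ p.1) :
    pvALoop l seen dups = dups ++ (l.flatMap (pvBEmit (l.foldl pvBStep1 seen))) := by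
  induction l generalizing seen dups with
  | nil => simp [pvALoop]
  | cons p rest ih =>
    obtain ⟨node, deps⟩ := p
    simp only [List.map_cons, List.nodup_cons] at hn
    obtain ⟨hnot, hnd⟩ := hn
    by_cases hOR : PySem.Str.startswith node "OR_NODE" = true
    · cases hg : seen.get? (pvKey deps) with
      | some f =>
        have hcon : seen.contains (pvKey deps) = true := by
          rw [PySem.Dict.contains_eq_isSome_get?, hg]; rfl
        have hstep : pvBStep1 seen (node, deps) = seen := by
          simp only [pvBStep1]
          rw [hcon]
          simp
        have hget : (rest.foldl pvBStep1 seen).get? (pvKey deps) = some f :=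
          pvPass1_preserve rest seen _ _ hg
        have hne : f ≠ node := h1 (node, deps) (by simp) hOR f hg
        have hA : pvALoop ((node, deps) :: rest) seen dups
            = pvALoop rest seen (dups ++ [(node, f)]) := by
          simp only [pvALoop]
          rw [if_neg (by rw [hOR]; simp), hg]
        have hemit : pvBEmit (rest.foldl pvBStep1 seen) (node, deps) = [(node, f)] := by
          simp only [pvBEmit]
          rw [if_pos hOR, hget]
          simp [hne]
        rw [hA, ih seen (dups ++ [(node, f)]) hnd
          (fun q hq hq1 g hg' => h1 q (by simp [hq]) hq1 g hg')]
        simp only [List.foldl_cons, List.flatMap_cons, hstep, hemit]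
        simp
      | none =>
        have hcon : seen.contains (pvKey deps) = false := by
          rw [PySem.Dict.contains_eq_isSome_get?, hg]; rfl
        have hstep : pvBStep1 seen (node, deps) = seen.insert (pvKey deps) node := by
          simp only [pvBStep1]
          rw [hOR, hcon]
          simp
        have hget : (rest.foldl pvBStep1 (seen.insert (pvKey deps) node)).get? (pvKey deps)
            = some node :=
          pvPass1_preserve rest _ _ _ (PySem.Dict.get?_insert_self _ _ _)
        have h1' : ∀ q ∈ rest, PySem.Str.startswith q.1 "OR_NODE" = true →
            ∀ g, (seen.insert (pvKey deps) node).get? (pvKey q.2) = some g → g ≠ q.1 := by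
          intro q hq hq1 g hg'
          by_cases hk : pvKey q.2 = pvKey deps
          · rw [hk, PySem.Dict.get?_insert_self] at hg'
            cases hg'
            intro he
            exact hnot (by rw [he]; exact List.mem_map_of_mem hq)
          · rw [PySem.Dict.get?_insert_of_ne seen node hk] at hg'
            exact h1 q (by simp [hq]) hq1 g hg'
        have hA : pvALoop ((node, deps) :: rest) seen dups
            = pvALoop rest (seen.insert (pvKey deps) node) dups := by
          simp only [pvALoop]
          rw [if_neg (by rw [hOR]; simp), hg]
        have hemit : pvBEmit (rest.foldl pvBStep1 (seen.insert (pvKey deps) node)) (node, deps)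
            = [] := by
          simp only [pvBEmit]
          rw [if_pos hOR, hget]
          simp
        rw [hA, ih (seen.insert (pvKey deps) node) dups hnd h1']
        simp only [List.foldl_cons, List.flatMap_cons, hstep, hemit]
        simp
    · have hORf : PySem.Str.startswith node "OR_NODE" = false := by
        revert hOR; cases PySem.Str.startswith node "OR_NODE" <;> simp
      have hstep : pvBStep1 seen (node, deps) = seen := by
        simp only [pvBStep1]
        rw [hORf]
        simp
      have hA : pvALoop ((node, deps) :: rest) seen dups = pvALoop rest seen dups := by
        simp only [pvALoop]
        rw [if_pos hORf]
      have hemit : pvBEmit (rest.foldl pvBStep1 seen) (node, deps) = [] := by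
        simp only [pvBEmit]
        rw [if_neg (by rw [hORf]; simp)]
      rw [hA, ih seen dups hnd (fun q hq hq1 g hg' => h1 q (by simp [hq]) hq1 g hg')]
      simp only [List.foldl_cons, List.flatMap_cons, hstep, hemit]
      simp

-- ===== VERDICT (by name: the statement is the Claim_ definition above) =====
theorem find_duplicate_or_nodes_spec : Claim_equal_find_duplicate_or_nodes := by
  intro graph _
  unfold Spec_find_duplicate_or_nodes find_duplicate_or_nodes find_duplicate_or_nodes_alt
  have hnd : ((PySem.Dict.ofList graph).items.map Prod.fst).Nodup :=
    PySem.Dict.nodup_keys_ofList graph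
  rw [pvMain _ _ _ hnd (fun q _ _ g hg => by simp [PySem.Dict.get?_empty] at hg)]
  rw [PySem.List.foldl_append_eq_flatMap]
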